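-- pv_equiv track=rewrite | github.com/satos---jp/Esolang-Snippets | src/libraries/whitespace.py | i2w
-- ===== SOURCE A (Python) =====
-- def i2w(x):
-- 	if x>=0:
-- 		res = " "
-- 	else:
-- 		res = "\t"
-- 		x *= -1
-- 	ad = ''
-- 	while x>0:
-- 		ad = ("\t" if x%2==1 else " ") + ad
-- 		x //= 2
-- 	res += ad + "\n"
-- 	return res
-- ===== SOURCE B (Python) =====
-- def i2w(x):
--     sign = ' ' if x >= 0 else '\t'
--     n = abs(x)
--     out = [sign]
--     p = 1
--     while p <= n:
--         p <<= 1
--     p >>= 1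
--     while p:
--         if n >= p:
--             out.append('\t')
--             n -= p
--         else:
--             out.append(' ')
--         p >>= 1
--     out.append('\n')
--     return ''.join(out)
-- ===== Notes on version B (the rewrite author's own statement) =====
-- stated objective: alternative
-- what changed: Replaced A's LSB-first divide-by-2 loop that prepends each extracted bit with a greedy MSB-first algorithm: find the least power of two exceeding |x|, then walk it down, subtracting each power that fits and emitting the digits in output order into a list joined once.
import Mathlib
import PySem

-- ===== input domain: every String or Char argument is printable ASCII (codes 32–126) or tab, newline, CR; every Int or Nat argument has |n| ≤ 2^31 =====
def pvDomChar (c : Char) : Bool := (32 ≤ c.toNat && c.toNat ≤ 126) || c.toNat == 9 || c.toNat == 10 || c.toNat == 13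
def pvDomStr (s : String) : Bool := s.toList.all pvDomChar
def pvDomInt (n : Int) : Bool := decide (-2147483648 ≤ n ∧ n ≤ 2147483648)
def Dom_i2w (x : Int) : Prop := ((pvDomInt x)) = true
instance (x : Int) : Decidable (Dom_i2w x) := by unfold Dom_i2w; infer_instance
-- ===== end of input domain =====

-- B replaces A's LSB-first divide-by-2 prepend loop by a greedy MSB-first power-of-two
-- subtraction walk (find the least power of 2 exceeding |x|, walk it down, subtract and emit).
-- Alternative decomposition; return value only, no side effects.

-- ===== PORT A =====
-- the while loop of A: state (x, ad)
def i2wLoop (x : Int) (ad : String) : String :=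
  if _h : x > 0 then
    i2wLoop (PySem.Int.floordiv x 2)
      ((if PySem.Int.mod x 2 == 1 then "\t" else " ") ++ ad)
  else ad
termination_by x.toNat
decreasing_by
  have : PySem.Int.floordiv x 2 = x / 2 := by
    simp [PySem.Int.floordiv]; rw [Int.fdiv_eq_ediv_of_nonneg x (by norm_num)]
  rw [this]; omega

def i2w (x : Int) : String :=
  if x ≥ 0 then
    " " ++ i2wLoop x "" ++ "\n"
  else
    "\t" ++ i2wLoop (-x) "" ++ "\n"

-- ===== PORT B =====
-- first while loop of B: double p until it exceeds n (the `0 < p` guard only makes the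
-- recursion total; Python always starts at p = 1)
def powUp (n p : Nat) : Nat :=
  if h : 0 < p ∧ p ≤ n then powUp n (2 * p) else p
termination_by n + 1 - p

-- second while loop of B: walk p down over the bit positions, subtracting greedily;
-- the emitted characters are collected in order (Python appends to `out`)
def greedy (n p : Nat) : List Char :=
  if h : p ≠ 0 then
    if p ≤ n then '\t' :: greedy (n - p) (p / 2)
    else ' ' :: greedy n (p / 2)
  else []
termination_by p
decreasing_by all_goals exact Nat.div_lt_self (Nat.pos_of_ne_zero h) (by norm_num)

def i2w_alt (x : Int) : String :=
  let sign := if x ≥ 0 then " " else "\t"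
  let n := x.natAbs
  sign ++ String.ofList (greedy n (powUp n 1 / 2)) ++ "\n"

-- ===== PRECONDITION & SPEC =====
def Spec_i2w (x : Int) (out : String) : Prop := out = i2w_alt x
instance (x : Int) (out : String) : Decidable (Spec_i2w x out) := by unfold Spec_i2w; infer_instance

-- ===== CLAIM (what is proved, stated in full; the proofs are below) =====
def Claim_equal_i2w : Prop := ∀ (x : Int), Dom_i2w x → Spec_i2w x (i2w x)

-- ===== LEMMAS AND PROOFS =====

-- reference: the k-digit MSB-first whitespace rendering of n
def Lfix : Nat → Nat → List Char
  | 0, _ => []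
  | (k+1), n => Lfix k (n / 2) ++ [if n % 2 == 1 then '\t' else ' ']

theorem size_two_mul (m : Nat) (h : m ≠ 0) : (2 * m).size = m.size + 1 := by
  have := Nat.size_bit (b := false) (n := m) (by simp [h])
  simpa [Nat.bit] using this

theorem size_two_mul_add_one (m : Nat) : (2 * m + 1).size = m.size + 1 := by
  have := Nat.size_bit (b := true) (n := m) (by simp)
  simpa [Nat.bit] using this

theorem lfix_msb (k : Nat) : ∀ n : Nat, n < 2 ^ (k + 1) →
    Lfix (k + 1) n = (if 2 ^ k ≤ n then '\t' else ' ') :: Lfix k (n % 2 ^ k) := by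
  induction k with
  | zero =>
    intro n hn
    interval_cases n <;> simp [Lfix]
  | succ k ih =>
    intro n hn
    have hdiv : n / 2 < 2 ^ (k + 1) := by
      have h2 : (2:Nat) ^ (k + 1 + 1) = 2 ^ (k + 1) * 2 := Nat.pow_succ ..
      rw [h2] at hn; omega
    have h1 : Lfix (k + 2) n = Lfix (k + 1) (n / 2) ++ [if n % 2 == 1 then '\t' else ' '] := rfl
    rw [h1, ih (n / 2) hdiv]
    have hle : (2 ^ k ≤ n / 2) ↔ (2 ^ (k + 1) ≤ n) := by
      have h2 : (2:Nat) ^ (k + 1) = 2 ^ k * 2 := Nat.pow_succ ..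
      rw [h2]; omega
    have hmod2 : n % 2 ^ (k + 1) / 2 = n / 2 % 2 ^ k := by
      have h2 : (2:Nat) ^ (k + 1) = 2 * 2 ^ k := by rw [Nat.pow_succ]; ring
      rw [h2]
      exact Nat.mod_mul_right_div_self ..
    have hparity : n % 2 ^ (k + 1) % 2 = n % 2 :=
      Nat.mod_mod_of_dvd n (dvd_pow_self 2 (Nat.succ_ne_zero k))
    have h2 : Lfix (k + 1) (n % 2 ^ (k + 1))
        = Lfix k (n / 2 % 2 ^ k) ++ [if n % 2 == 1 then '\t' else ' '] := by
      show Lfix k (n % 2 ^ (k + 1) / 2) ++ _ = _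
      rw [hmod2, hparity]
    rw [h2]
    simp only [hle]
    rfl

theorem greedy_eq (k : Nat) : ∀ n : Nat, n < 2 ^ (k + 1) →
    greedy n (2 ^ k) = Lfix (k + 1) n := by
  induction k with
  | zero =>
    intro n hn
    interval_cases n <;> simp [greedy, Lfix]
  | succ k ih =>
    intro n hn
    rw [greedy, lfix_msb (k + 1) n hn]
    have hp : (2:Nat) ^ (k + 1) ≠ 0 := Nat.pos_iff_ne_zero.mp (Nat.two_pow_pos _)
    rw [dif_pos hp]
    have hdiv : (2:Nat) ^ (k + 1) / 2 = 2 ^ k := by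
      rw [Nat.pow_succ]; omega
    by_cases hc : 2 ^ (k + 1) ≤ n
    · have hsub : n - 2 ^ (k + 1) = n % 2 ^ (k + 1) := by
        have h2 : (2:Nat) ^ (k + 1 + 1) = 2 ^ (k + 1) * 2 := Nat.pow_succ ..
        rw [h2] at hn
        rw [Nat.mod_eq_sub_mod hc, Nat.mod_eq_of_lt (by omega)]
      have hlt : n % 2 ^ (k + 1) < 2 ^ (k + 1) := Nat.mod_lt _ (Nat.two_pow_pos _)
      rw [if_pos hc, if_pos hc, hsub, hdiv, ih _ hlt]
    · have hmod : n % 2 ^ (k + 1) = n := Nat.mod_eq_of_lt (by omega)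
      rw [if_neg hc, if_neg hc, hdiv, ih _ (by omega), hmod]

theorem powUp_eq (n : Nat) : ∀ j : Nat, powUp n (2 ^ j) = 2 ^ (max j n.size) := by
  have key : ∀ d j : Nat, n.size - j ≤ d → powUp n (2 ^ j) = 2 ^ (max j n.size) := by
    intro d
    induction d with
    | zero =>
      intro j hj
      have hle : n.size ≤ j := by omega
      have : n < 2 ^ j := Nat.size_le.mp hle
      rw [powUp, dif_neg (by omega)]
      rw [Nat.max_eq_left hle]
    | succ d ihd =>
      intro j hj
      by_cases hc : 2 ^ j ≤ n
      · have hjlt : j < n.size := by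
          by_contra hh
          have := Nat.size_le.mp (Nat.le_of_not_lt hh)
          omega
        rw [powUp, dif_pos ⟨Nat.two_pow_pos _, hc⟩]
        have h2 : (2:Nat) * 2 ^ j = 2 ^ (j + 1) := by rw [Nat.pow_succ]; ring
        rw [h2, ihd (j + 1) (by omega)]
        have h3 : max (j + 1) n.size = n.size := Nat.max_eq_right (by omega)
        rw [h3, Nat.max_eq_right (by omega)]
      · have hlt : n < 2 ^ j := by omega
        have hle : n.size ≤ j := Nat.size_le.mpr hlt
        rw [powUp, dif_neg (by omega), Nat.max_eq_left hle]
  intro j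
  exact key (n.size - j) j le_rfl

-- A's loop computes the MSB-first rendering with exactly n.size digits
theorem i2wLoop_eq (n : Nat) : ∀ ad : String,
    i2wLoop (n : Int) ad = String.ofList (Lfix n.size n) ++ ad := by
  induction n using Nat.strong_induction_on with
  | _ n ih =>
    intro ad
    by_cases hn : n = 0
    · subst hn
      rw [i2wLoop, dif_neg (by omega)]
      simp [Lfix]
    · have hpos : (0:Int) < (n:Int) := by exact_mod_cast Nat.pos_of_ne_zero hn
      rw [i2wLoop, dif_pos hpos]
      have hmod : PySem.Int.mod (n : Int) 2 = ((n % 2 : Nat) : Int) := by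
        simp only [PySem.Int.mod]
        rw [Int.fmod_eq_emod]
        push_cast; norm_num
      have hdiv : PySem.Int.floordiv (n : Int) 2 = ((n / 2 : Nat) : Int) := by
        simp only [PySem.Int.floordiv]
        rw [Int.fdiv_eq_ediv_of_nonneg (n : Int) (by norm_num)]
        push_cast; rfl
      rw [hmod, hdiv, ih (n / 2) (Nat.div_lt_self (Nat.pos_of_ne_zero hn) (by norm_num))]
      have hsize : n.size = (n / 2).size + 1 := by
        conv_lhs => rw [show n = 2 * (n / 2) + n % 2 by omega]
        rcases Nat.mod_two_eq_zero_or_one n with h | h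
        · rw [h]
          exact size_two_mul (n / 2) (by omega)
        · rw [h]
          exact size_two_mul_add_one (n / 2)
      rw [hsize]
      show _ = String.ofList (Lfix (n / 2).size (n / 2) ++ [if n % 2 == 1 then '\t' else ' ']) ++ ad
      rw [String.ofList_append]
      have hm : ((if (((n % 2 : Nat) : Int)) == 1 then "\t" else " ") : String)
          = String.ofList [if n % 2 == 1 then '\t' else ' '] := by
        rcases Nat.mod_two_eq_zero_or_one n with h | h <;> simp [h]
      rw [hm, String.append_assoc]

-- B's two loops together also produce that rendering: powUp finds 2 ^ n.size
theorem loop_vs_greedy (n : Nat) :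
    i2wLoop (n : Int) "" = String.ofList (greedy n (powUp n 1 / 2)) := by
  have hpw : powUp n 1 = 2 ^ n.size := by simpa using powUp_eq n 0
  by_cases h0 : n = 0
  · subst h0
    rw [i2wLoop, dif_neg (by omega), hpw]
    simp [greedy]
  · obtain ⟨s, hs⟩ : ∃ s, n.size = s + 1 :=
      ⟨n.size - 1, by have := Nat.size_pos.mpr (Nat.pos_of_ne_zero h0); omega⟩
  
    have hp2 : powUp n 1 / 2 = 2 ^ s := by
      rw [hpw, hs, Nat.pow_succ]; omega
    have hlt : n < 2 ^ (s + 1) := hs ▸ Nat.lt_size_self n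
    rw [hp2, greedy_eq s n hlt, i2wLoop_eq n "", hs]
    simp

theorem i2w_eq_alt (x : Int) : i2w x = i2w_alt x := by
  rw [i2w, i2w_alt]
  by_cases hx : x ≥ 0
  · simp only [if_pos hx]
    have hx' : ((x.natAbs : Nat) : Int) = x := by omega
    conv_lhs => rw [← hx']
    rw [loop_vs_greedy]
  · simp only [if_neg hx]
    have hx' : ((x.natAbs : Nat) : Int) = -x := by omega
    conv_lhs => rw [← hx']
    rw [loop_vs_greedy]

-- ===== VERDICT (by name: the statement is the Claim_ definition above) =====
theorem i2w_spec : Claim_equal_i2w := by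
  intro x _
  unfold Spec_i2w
  exact i2w_eq_alt x
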